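-- pv_equiv track=rewrite | github.com/Quokka0903/PGMS | Level_2/lv2_더맵게.py | solution
-- ===== SOURCE A (Python) =====
-- def solution(scoville, K):
--     answer = 0
--     import heapq
--
--     heapq.heapify(scoville)
--     while scoville[0] < K and len(scoville) > 1:
--         min_1 = heapq.heappop(scoville)
--         min_2 = heapq.heappop(scoville)
--         heapq.heappush(scoville, min_1 + min_2 * 2)
--         answer += 1
--
--     if scoville[0] < K:
--         return -1
--
--     return answer
-- ===== SOURCE B (Python) =====
-- def _front(q1, i1, q2, i2):
--     # smallest unconsumed value across the two queues (q1 from i1, q2 from i2)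
--     if i1 < len(q1) and (i2 == len(q2) or q1[i1] <= q2[i2]):
--         return q1[i1]
--     return q2[i2]
--
--
-- def solution(scoville, K):
--     # Note: A heapifies its argument in place; B leaves the argument unchanged
--     # (the equivalence claimed is about the return value).
--     answer = 0
--     q1 = sorted(scoville)  # original values, consumed from the front
--     q2 = []                # combined values, created in nondecreasing order
--     i1 = 0
--     i2 = 0
--     while _front(q1, i1, q2, i2) < K and (len(q1) - i1) + (len(q2) - i2) > 1:
--         mins = []
--         for _ in range(2):
--             if i1 < len(q1) and (i2 == len(q2) or q1[i1] <= q2[i2]):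
--                 mins.append(q1[i1])
--                 i1 += 1
--             else:
--                 mins.append(q2[i2])
--                 i2 += 1
--         q2.append(mins[0] + 2 * mins[1])
--         answer += 1
--     if _front(q1, i1, q2, i2) < K:
--         return -1
--     return answer
-- ===== Notes on version B (the rewrite author's own statement) =====
-- stated objective: alternative
-- what changed: Replaces A's binary heap (heapify/heappop/heappush) with one upfront sort plus a two-queue merge: the sorted originals and a queue of combined values (provably produced in nondecreasing order) are each consumed from the front, so every combine step is O(1) instead of O(log n) heap work; B also leaves its argument unmutated while A heapifies it in place.
import Mathlib
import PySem

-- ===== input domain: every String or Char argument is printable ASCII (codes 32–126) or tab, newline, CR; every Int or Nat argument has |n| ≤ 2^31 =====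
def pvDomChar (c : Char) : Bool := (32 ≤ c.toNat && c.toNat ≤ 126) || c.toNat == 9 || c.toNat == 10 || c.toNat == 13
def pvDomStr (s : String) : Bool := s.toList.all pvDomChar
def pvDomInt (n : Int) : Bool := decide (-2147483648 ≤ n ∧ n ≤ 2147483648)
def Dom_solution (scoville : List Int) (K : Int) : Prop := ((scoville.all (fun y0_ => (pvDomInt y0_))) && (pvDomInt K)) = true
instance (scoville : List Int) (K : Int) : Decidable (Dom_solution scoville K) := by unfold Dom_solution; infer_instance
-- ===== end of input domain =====

-- B replaces A's binary heap with one upfront sort and a two-queue merge (sorted originals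
-- + a queue of combined values, each consumed from the front) — no heap and no per-step
-- re-insertion (objective: alternative). A heapifies its argument in place; B does not
-- mutate it: the equivalence is about the return value.

-- ===== PORT A =====
-- A's heapq calls are ported by their library contract: a heap's root scoville[0] is the
-- smallest element, heappop removes and returns the smallest, heappush adds an element.
-- pyMin l = the smallest element of a nonempty l (0 is a dummy for [], never used inside Pre_).
def pyMin (l : List Int) : Int :=
  match l with
  | [] => 0
  | x :: xs => xs.foldl min x

-- the while loop; fuel = current length bounds the iteration count (length drops by 1 each turn);
-- -2 is returned only on fuel 0 / empty heap, which Pre_solution excludes (IndexError in Python).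
def solGo (K : Int) : Nat → List Int → Int → Int
  | 0, _, _ => -2
  | _ + 1, [], _ => -2
  | f + 1, x :: xs, answer =>
    let h := x :: xs
    let m1 := pyMin h
    if m1 < K ∧ 1 < h.length then
      let rest1 := h.erase m1
      let m2 := pyMin rest1
      solGo K f ((m1 + m2 * 2) :: rest1.erase m2) (answer + 1)
    else if m1 < K then -1 else answer

def solution (scoville : List Int) (K : Int) : Int :=
  solGo K scoville.length scoville 0

-- ===== PORT B =====
-- port of _front: the smallest unconsumed value across the two queues; the getD default 0
-- models the IndexError branch, which only the empty input reaches (excluded by Pre_solution)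
def tqFront (q1 : List Int) (i1 : Nat) (q2 : List Int) (i2 : Nat) : Int :=
  if i1 < q1.length ∧ (i2 = q2.length ∨ q1.getD i1 0 ≤ q2.getD i2 0) then q1.getD i1 0
  else q2.getD i2 0

-- one turn of the 'for _ in range(2)' pop loop: the popped value and the advanced indices
def tqPop (q1 : List Int) (i1 : Nat) (q2 : List Int) (i2 : Nat) : Int × Nat × Nat :=
  if i1 < q1.length ∧ (i2 = q2.length ∨ q1.getD i1 0 ≤ q2.getD i2 0) then
    (q1.getD i1 0, i1 + 1, i2)
  else (q2.getD i2 0, i1, i2 + 1)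

-- B's while loop; fuel = initial length bounds the iteration count (the number of live
-- values drops by 1 each turn); -2 marks the empty-input IndexError states, outside Pre_solution
def tqGo (K : Int) : Nat → List Int → Nat → List Int → Nat → Int → Int
  | 0, _, _, _, _, _ => -2
  | f + 1, q1, i1, q2, i2, answer =>
    if i1 < q1.length ∨ i2 < q2.length then
      if tqFront q1 i1 q2 i2 < K ∧ 1 < (q1.length - i1) + (q2.length - i2) then
        match tqPop q1 i1 q2 i2 with
        | (a, j1, j2) =>
          match tqPop q1 j1 q2 j2 with
          | (b, k1, k2) => tqGo K f q1 k1 (q2 ++ [a + 2 * b]) k2 (answer + 1)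
      else if tqFront q1 i1 q2 i2 < K then -1 else answer
    else -2

def solution_alt (scoville : List Int) (K : Int) : Int :=
  let q1 := PySem.List.sorted scoville (fun x => x) false
  tqGo K q1.length q1 0 [] 0 0

-- ===== PRECONDITION & SPEC =====
-- Pre_ excludes only the empty list, on which Python A raises IndexError at scoville[0].
def Pre_solution (scoville : List Int) (K : Int) : Prop := scoville ≠ []
instance (scoville : List Int) (K : Int) : Decidable (Pre_solution scoville K) := by
  unfold Pre_solution; infer_instance

def pvWitness_solution : List Int × Int := ([1, 2, 3, 9, 10, 12], 7)

def Spec_solution (scoville : List Int) (K : Int) (out : Int) : Prop := out = solution_alt scoville K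
instance (scoville : List Int) (K : Int) (out : Int) : Decidable (Spec_solution scoville K out) := by unfold Spec_solution; infer_instance

-- ===== CLAIM (what is proved, stated in full; the proofs are below) =====
def Claim_equal_solution : Prop := ∀ (scoville : List Int) (K : Int), Dom_solution scoville K → Pre_solution scoville K → Spec_solution scoville K (solution scoville K)

-- ===== LEMMAS AND PROOFS =====

-- ---- facts about pyMin ----

theorem foldl_min_le_init (xs : List Int) (x : Int) : xs.foldl min x ≤ x := by
  induction xs generalizing x with
  | nil => simp
  | cons y ys ih =>
    simpa using le_trans (ih (min x y)) (min_le_left x y)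

theorem foldl_min_le_mem (xs : List Int) (x y : Int) (hy : y ∈ xs) : xs.foldl min x ≤ y := by
  induction xs generalizing x with
  | nil => cases hy
  | cons z zs ih =>
    rcases List.mem_cons.mp hy with rfl | h
    · simpa using le_trans (foldl_min_le_init zs (min x y)) (min_le_right x y)
    · exact ih (min x z) h

theorem foldl_min_mem (xs : List Int) (x : Int) : xs.foldl min x = x ∨ xs.foldl min x ∈ xs := by
  induction xs generalizing x with
  | nil => left; rfl
  | cons y ys ih =>
    rcases ih (min x y) with h | h
    · rcases min_cases x y with ⟨h', _⟩ | ⟨h', _⟩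
      · left; simp only [List.foldl_cons]; rw [h, h']
      · right; simp only [List.foldl_cons]; rw [h, h']; exact List.mem_cons_self
    · right; exact List.mem_cons_of_mem _ h

theorem pyMin_mem (l : List Int) (hl : l ≠ []) : pyMin l ∈ l := by
  cases l with
  | nil => exact absurd rfl hl
  | cons x xs =>
    rcases foldl_min_mem xs x with h | h
    · simp [pyMin, h]
    · exact List.mem_cons_of_mem _ (by simpa [pyMin] using h)

theorem pyMin_le (l : List Int) (y : Int) (hy : y ∈ l) : pyMin l ≤ y := by
  cases l with
  | nil => cases hy
  | cons x xs =>
    rcases List.mem_cons.mp hy with rfl | h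
    · simpa [pyMin] using foldl_min_le_init xs y
    · simpa [pyMin] using foldl_min_le_mem xs x y h

theorem pyMin_eq_of (l : List Int) (x : Int) (hx : x ∈ l) (h : ∀ y ∈ l, x ≤ y) :
    pyMin l = x :=
  le_antisymm (pyMin_le l x hx) (h _ (pyMin_mem l (List.ne_nil_of_mem hx)))

theorem pyMin_perm (h s : List Int) (hp : h.Perm s) (hne : h ≠ []) : pyMin h = pyMin s := by
  have hsne : s ≠ [] := by
    intro hc; exact hne (List.Perm.eq_nil (hc ▸ hp))
  exact le_antisymm
    (pyMin_le h _ (hp.mem_iff.mpr (pyMin_mem s hsne)))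
    (pyMin_le s _ (hp.mem_iff.mp (pyMin_mem h hne)))

theorem pyMin_cons (x : Int) (l : List Int) (hl : l ≠ []) :
    pyMin (x :: l) = min x (pyMin l) := by
  refine le_antisymm (le_min (pyMin_le _ _ List.mem_cons_self) ?_) ?_
  · exact pyMin_le _ _ (List.mem_cons_of_mem _ (pyMin_mem l hl))
  · rcases List.mem_cons.mp (pyMin_mem (x :: l) (by simp)) with h | h
    · rw [h]; exact min_le_left _ _
    · exact le_trans (min_le_right _ _) (pyMin_le l _ h)

-- ---- min1 + 2*min2 of a pool ----

def m2sum (l : List Int) : Int := pyMin l + 2 * pyMin (l.erase (pyMin l))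

theorem m2sum_perm (l l' : List Int) (hp : l.Perm l') (hne : l ≠ []) : m2sum l = m2sum l' := by
  have h1 : pyMin l = pyMin l' := pyMin_perm _ _ hp hne
  unfold m2sum
  rw [h1]
  by_cases h2 : l.erase (pyMin l') = []
  · have : l'.erase (pyMin l') = [] := by
      have := (hp.erase (pyMin l')).symm
      rw [h2] at this
      exact this.eq_nil
    rw [h2, this]
  · rw [pyMin_perm _ _ (hp.erase (pyMin l')) h2]

-- the pool evolves by erasing its minimum twice; after removing any surviving combined
-- value c, the two smallest of the remainder are still exactly (a, b)
theorem erase_comm_perm (S : List Int) (a b c : Int) (ha : a ∈ S) (hb : b ∈ S.erase a)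
    (hc : c ∈ (S.erase a).erase b) :
    (S.erase c).Perm (a :: b :: (((S.erase a).erase b).erase c)) := by
  rw [← Multiset.coe_eq_coe, ← Multiset.coe_erase]
  have h1 : (S : Multiset Int) = a ::ₘ b ::ₘ c ::ₘ ((((S.erase a).erase b).erase c) : Multiset Int) := by
    rw [← Multiset.coe_erase, ← Multiset.coe_erase, ← Multiset.coe_erase]
    rw [Multiset.cons_erase (by simpa using hc), Multiset.cons_erase (by simpa using hb),
      Multiset.cons_erase (by simpa using ha)]
  rw [h1]
  have h2 : (a ::ₘ b ::ₘ c ::ₘ ((((S.erase a).erase b).erase c) : Multiset Int))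
      = c ::ₘ a ::ₘ b ::ₘ ((((S.erase a).erase b).erase c) : Multiset Int) := by
    rw [Multiset.cons_swap b c, Multiset.cons_swap a c]
  rw [h2, Multiset.erase_cons_head]
  rfl

theorem m2sum_erase_eq (S : List Int) (a b c : Int) (hSne : S ≠ [])
    (ha : a = pyMin S) (hS1ne : S.erase a ≠ []) (hb : b = pyMin (S.erase a))
    (hc : c ∈ (S.erase a).erase b) : m2sum (S.erase c) = a + 2 * b := by
  have haS : a ∈ S := ha ▸ pyMin_mem S hSne
  have hbS : b ∈ S.erase a := hb ▸ pyMin_mem _ hS1ne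
  have hperm := erase_comm_perm S a b c haS hbS hc
  have hEne : S.erase c ≠ [] := by
    intro h0
    rw [h0] at hperm
    have := hperm.symm.eq_nil
    simp at this
  rw [m2sum_perm _ _ hperm hEne]
  have hXsub : ∀ y ∈ ((S.erase a).erase b).erase c, y ∈ S.erase a := fun y hy =>
    List.mem_of_mem_erase (List.mem_of_mem_erase hy)
  have hmin1 : pyMin (a :: b :: ((S.erase a).erase b).erase c) = a := by
    refine pyMin_eq_of _ _ List.mem_cons_self ?_
    intro y hy
    rcases List.mem_cons.mp hy with rfl | hy
    · exact le_rfl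
    rcases List.mem_cons.mp hy with rfl | hy
    · exact ha ▸ pyMin_le S _ (List.mem_of_mem_erase hbS)
    · exact ha ▸ pyMin_le S _ (List.mem_of_mem_erase (hXsub _ hy))
  have hmin2 : pyMin (b :: ((S.erase a).erase b).erase c) = b := by
    refine pyMin_eq_of _ _ List.mem_cons_self ?_
    intro y hy
    rcases List.mem_cons.mp hy with rfl | hy
    · exact le_rfl
    · exact hb ▸ pyMin_le _ _ (hXsub _ hy)
  unfold m2sum
  rw [hmin1, List.erase_cons_head, hmin2]

-- after removing one copy of a queued value c from the pool, the sum of the remainder's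
-- two smallest is still at least c (the inductive invariant on the combined-values queue)
def Inv3 (r2 S : List Int) : Prop :=
  ∀ c ∈ r2, 2 ≤ (S.erase c).length → c ≤ m2sum (S.erase c)

-- arithmetic core of the invariant's preservation: the pool is 'new' plus values ≥ b ≥ 0
theorem min2_cons_bound (nw b c : Int) (M : List Int) (hM : ∀ y ∈ M, b ≤ y) (hb0 : 0 ≤ b)
    (hMne : M ≠ []) (hc : c ≤ nw) (h3b : nw ≤ 3 * b) : c ≤ m2sum (nw :: M) := by
  have hp : b ≤ pyMin M := hM _ (pyMin_mem M hMne)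
  have hcons := pyMin_cons nw M hMne
  by_cases hnp : nw ≤ pyMin M
  · have h1 : pyMin (nw :: M) = nw := by rw [hcons]; exact min_eq_left hnp
    unfold m2sum
    rw [h1, List.erase_cons_head]
    have : 0 ≤ pyMin M := le_trans hb0 hp
    omega
  · push_neg at hnp
    have h1 : pyMin (nw :: M) = pyMin M := by rw [hcons]; exact min_eq_right (le_of_lt hnp)
    have hne2 : nw ≠ pyMin M := ne_of_gt hnp
    unfold m2sum
    rw [h1, List.erase_cons_tail (by simpa using hne2)]
    have hnw0 : 0 < nw := lt_of_le_of_lt (le_trans hb0 hp) hnp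
    by_cases hMe : M.erase (pyMin M) = []
    · rw [hMe]
      have h2 : pyMin [nw] = nw := by simp [pyMin]
      rw [h2]; omega
    · rw [pyMin_cons nw _ hMe]
      have hq : b ≤ pyMin (M.erase (pyMin M)) :=
        hM _ (List.mem_of_mem_erase (pyMin_mem _ hMe))
      rcases min_cases nw (pyMin (M.erase (pyMin M))) with ⟨he, _⟩ | ⟨he, _⟩ <;> rw [he] <;> omega

theorem erase_cons_perm (x c : Int) (T : List Int) (hc : c ∈ T) :
    ((x :: T).erase c).Perm (x :: T.erase c) := by
  by_cases hxc : x = c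
  · subst hxc
    rw [List.erase_cons_head]
    exact List.perm_cons_erase hc
  · rw [List.erase_cons_tail (by simpa using hxc)]

-- ---- the abstract two-queue step (on the live suffixes) ----

def aFront : List Int → List Int → Int
  | [], [] => 0
  | [], y :: _ => y
  | x :: _, [] => x
  | x :: _, y :: _ => if x ≤ y then x else y

def aPop : List Int → List Int → Int × List Int × List Int
  | [], [] => (0, [], [])
  | [], y :: yt => (y, [], yt)
  | x :: xt, [] => (x, xt, [])
  | x :: xt, y :: yt => if x ≤ y then (x, xt, y :: yt) else (y, x :: xt, yt)

def aGo (K : Int) : Nat → List Int → List Int → Int → Int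
  | 0, _, _, _ => -2
  | f + 1, r1, r2, answer =>
    if r1 ≠ [] ∨ r2 ≠ [] then
      if aFront r1 r2 < K ∧ 1 < r1.length + r2.length then
        match aPop r1 r2 with
        | (a, s1, s2) =>
          match aPop s1 s2 with
          | (b, u1, u2) => aGo K f u1 (u2 ++ [a + 2 * b]) (answer + 1)
      else if aFront r1 r2 < K then -1 else answer
    else -2

theorem aFront_spec (r1 r2 : List Int) (hs1 : r1.Pairwise (· ≤ ·)) (hs2 : r2.Pairwise (· ≤ ·))
    (hne : ¬(r1 = [] ∧ r2 = [])) : aFront r1 r2 = pyMin (r1 ++ r2) := by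
  match r1, r2 with
  | [], [] => exact absurd ⟨rfl, rfl⟩ hne
  | [], y :: yt =>
    refine (pyMin_eq_of _ _ (by simp [aFront]) ?_).symm
    intro z hz
    simp only [List.nil_append, List.mem_cons] at hz
    rcases hz with rfl | hz
    · simp [aFront]
    · simpa [aFront] using (List.pairwise_cons.mp hs2).1 _ hz
  | x :: xt, [] =>
    refine (pyMin_eq_of _ _ (by simp [aFront]) ?_).symm
    intro z hz
    simp only [List.append_nil, List.mem_cons] at hz
    rcases hz with rfl | hz
    · simp [aFront]
    · simpa [aFront] using (List.pairwise_cons.mp hs1).1 _ hz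
  | x :: xt, y :: yt =>
    by_cases hxy : x ≤ y
    · refine (pyMin_eq_of _ _ (by simp [aFront, hxy]) ?_).symm
      intro z hz
      simp only [aFront, if_pos hxy]
      rcases List.mem_append.mp hz with hz | hz
      · rcases List.mem_cons.mp hz with rfl | hz
        · exact le_rfl
        · exact (List.pairwise_cons.mp hs1).1 _ hz
      · rcases List.mem_cons.mp hz with rfl | hz
        · exact hxy
        · exact le_trans hxy ((List.pairwise_cons.mp hs2).1 _ hz)
    · push_neg at hxy
      refine (pyMin_eq_of _ _ (by simp [aFront, not_le.mpr hxy]) ?_).symm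
      intro z hz
      simp only [aFront, if_neg (not_le.mpr hxy)]
      rcases List.mem_append.mp hz with hz | hz
      · rcases List.mem_cons.mp hz with rfl | hz
        · exact le_of_lt hxy
        · exact le_trans (le_of_lt hxy) ((List.pairwise_cons.mp hs1).1 _ hz)
      · rcases List.mem_cons.mp hz with rfl | hz
        · exact le_rfl
        · exact (List.pairwise_cons.mp hs2).1 _ hz

theorem aPop_fst (r1 r2 : List Int) : (aPop r1 r2).1 = aFront r1 r2 := by
  match r1, r2 with
  | [], [] => rfl
  | [], y :: yt => rfl
  | x :: xt, [] => rfl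
  | x :: xt, y :: yt =>
    by_cases hxy : x ≤ y <;> simp [aPop, aFront, hxy]

theorem aPop_spec (r1 r2 : List Int) (hs1 : r1.Pairwise (· ≤ ·)) (hs2 : r2.Pairwise (· ≤ ·))
    (hne : ¬(r1 = [] ∧ r2 = [])) :
    (aPop r1 r2).2.1 ++ (aPop r1 r2).2.2 = (r1 ++ r2).erase (pyMin (r1 ++ r2)) ∧
      (aPop r1 r2).2.1 <:+ r1 ∧ (aPop r1 r2).2.2 <:+ r2 := by
  match r1, r2 with
  | [], [] => exact absurd ⟨rfl, rfl⟩ hne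
  | [], y :: yt =>
    have hy : pyMin ([] ++ y :: yt) = y := by
      rw [← aFront_spec _ _ hs1 hs2 hne]; rfl
    rw [hy]
    exact ⟨by simp [aPop, List.erase_cons_head], by simp [aPop], by simp [aPop]⟩
  | x :: xt, [] =>
    have hx : pyMin ((x :: xt) ++ []) = x := by
      rw [← aFront_spec _ _ hs1 hs2 hne]; rfl
    rw [hx]
    exact ⟨by simp [aPop, List.erase_cons_head], by simp [aPop], by simp [aPop]⟩
  | x :: xt, y :: yt =>
    by_cases hxy : x ≤ y
    · have hx : pyMin ((x :: xt) ++ y :: yt) = x := by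
        rw [← aFront_spec _ _ hs1 hs2 hne]; simp [aFront, hxy]
      rw [hx]
      refine ⟨by simp [aPop, hxy, List.erase_cons_head], by simp [aPop, hxy], by simp [aPop, hxy]⟩
    · push_neg at hxy
      have hy : pyMin ((x :: xt) ++ y :: yt) = y := by
        rw [← aFront_spec _ _ hs1 hs2 hne]; simp [aFront, not_le.mpr hxy]
      rw [hy]
      have hynot : y ∉ x :: xt := by
        intro hmem
        rcases List.mem_cons.mp hmem with rfl | hmem
        · exact lt_irrefl _ hxy
        · exact absurd ((List.pairwise_cons.mp hs1).1 _ hmem) (not_le.mpr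
            (lt_of_lt_of_le hxy le_rfl))
      refine ⟨?_, by simp [aPop, not_le.mpr hxy], by simp [aPop, not_le.mpr hxy]⟩
      simp only [aPop, if_neg (not_le.mpr hxy)]
      rw [List.erase_append_right _ hynot, List.erase_cons_head]

-- ---- stage 1 plumbing: the port's index state tracks the live suffixes ----

theorem getD_drop (s : List Int) (i k : Nat) : (s.drop i).getD k 0 = s.getD (i + k) 0 := by
  simp [List.getD_eq_getElem?_getD, List.getElem?_drop]

theorem getD_head_of_drop (q : List Int) (i : Nat) (x : Int) (t : List Int)
    (hd : q.drop i = x :: t) : q.getD i 0 = x := by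
  have := getD_drop q i 0
  rw [hd] at this
  simpa using this.symm

theorem drop_succ_of_drop (q : List Int) (i : Nat) (x : Int) (t : List Int)
    (hd : q.drop i = x :: t) : q.drop (i + 1) = t := by
  have : q.drop (i + 1) = (q.drop i).drop 1 := by rw [List.drop_drop]
  rw [this, hd, List.drop_one]
  rfl

theorem drop_ne_nil_iff (q : List Int) (i : Nat) : q.drop i ≠ [] ↔ i < q.length := by
  rw [ne_eq, List.drop_eq_nil_iff]
  omega

theorem tqPop_fst (q1 : List Int) (i1 : Nat) (q2 : List Int) (i2 : Nat) :
    (tqPop q1 i1 q2 i2).1 = tqFront q1 i1 q2 i2 := by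
  unfold tqPop tqFront
  split <;> rfl

theorem aPop_length (r1 r2 : List Int) (hne : ¬(r1 = [] ∧ r2 = [])) :
    (aPop r1 r2).2.1.length + (aPop r1 r2).2.2.length + 1 = r1.length + r2.length := by
  match r1, r2 with
  | [], [] => exact absurd ⟨rfl, rfl⟩ hne
  | [], y :: yt => simp [aPop]
  | x :: xt, [] => simp [aPop]
  | x :: xt, y :: yt =>
    by_cases hxy : x ≤ y <;> simp [aPop, hxy] <;> omega

theorem tqPop_corr (q1 : List Int) (i1 : Nat) (q2 : List Int) (i2 : Nat)
    (h1 : i1 ≤ q1.length) (h2 : i2 ≤ q2.length)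
    (hne : ¬(q1.drop i1 = [] ∧ q2.drop i2 = [])) :
    (tqPop q1 i1 q2 i2).1 = (aPop (q1.drop i1) (q2.drop i2)).1 ∧
    (tqPop q1 i1 q2 i2).2.1 ≤ q1.length ∧ (tqPop q1 i1 q2 i2).2.2 ≤ q2.length ∧
    q1.drop (tqPop q1 i1 q2 i2).2.1 = (aPop (q1.drop i1) (q2.drop i2)).2.1 ∧
    q2.drop (tqPop q1 i1 q2 i2).2.2 = (aPop (q1.drop i1) (q2.drop i2)).2.2 := by
  rcases hd1 : q1.drop i1 with _ | ⟨x, xt⟩ <;> rcases hd2 : q2.drop i2 with _ | ⟨y, yt⟩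
  · exact absurd ⟨hd1, hd2⟩ hne
  · -- q1 exhausted, q2 live
    have hi1 : ¬ i1 < q1.length := by rw [← drop_ne_nil_iff]; simp [hd1]
    have hi2 : i2 < q2.length := (drop_ne_nil_iff q2 i2).mp (by simp [hd2])
    have htp : tqPop q1 i1 q2 i2 = (q2.getD i2 0, i1, i2 + 1) := by
      unfold tqPop; rw [if_neg (by tauto)]
    simp only [htp, hd1, hd2]
    exact ⟨getD_head_of_drop q2 i2 y yt hd2, h1, by omega, rfl,
      drop_succ_of_drop q2 i2 y yt hd2⟩
  · -- q1 live, q2 exhausted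
    have hi1 : i1 < q1.length := (drop_ne_nil_iff q1 i1).mp (by simp [hd1])
    have hi2 : i2 = q2.length := by
      have : ¬ i2 < q2.length := by rw [← drop_ne_nil_iff]; simp [hd2]
      omega
    have htp : tqPop q1 i1 q2 i2 = (q1.getD i1 0, i1 + 1, i2) := by
      unfold tqPop; rw [if_pos ⟨hi1, Or.inl hi2⟩]
    simp only [htp, hd1, hd2]
    exact ⟨getD_head_of_drop q1 i1 x xt hd1, by omega, h2,
      drop_succ_of_drop q1 i1 x xt hd1, rfl⟩
  · -- both live
    have hi1 : i1 < q1.length := (drop_ne_nil_iff q1 i1).mp (by simp [hd1])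
    have hi2 : i2 < q2.length := (drop_ne_nil_iff q2 i2).mp (by simp [hd2])
    have hgx : q1.getD i1 0 = x := getD_head_of_drop q1 i1 x xt hd1
    have hgy : q2.getD i2 0 = y := getD_head_of_drop q2 i2 y yt hd2
    by_cases hxy : x ≤ y
    · have htp : tqPop q1 i1 q2 i2 = (q1.getD i1 0, i1 + 1, i2) := by
        unfold tqPop
        rw [if_pos ⟨hi1, Or.inr (by rw [hgx, hgy]; exact hxy)⟩]
      simp only [htp, hd1, hd2]
      refine ⟨?_, by omega, h2, ?_, ?_⟩
      · simpa [aPop, hxy] using hgx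
      · simpa [aPop, hxy] using drop_succ_of_drop q1 i1 x xt hd1
      · simp [aPop, hxy]
    · have hcond : ¬ (i1 < q1.length ∧ (i2 = q2.length ∨ q1.getD i1 0 ≤ q2.getD i2 0)) := by
        rintro ⟨-, hor⟩
        rcases hor with he | hle
        · omega
        · rw [hgx, hgy] at hle; exact hxy hle
      have htp : tqPop q1 i1 q2 i2 = (q2.getD i2 0, i1, i2 + 1) := by
        unfold tqPop; rw [if_neg hcond]
      simp only [htp, hd1, hd2]
      refine ⟨?_, h1, by omega, ?_, ?_⟩
      · simpa [aPop, hxy] using hgy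
      · simp [aPop, hxy]
      · simpa [aPop, hxy] using drop_succ_of_drop q2 i2 y yt hd2

theorem tqFront_corr (q1 : List Int) (i1 : Nat) (q2 : List Int) (i2 : Nat)
    (h1 : i1 ≤ q1.length) (h2 : i2 ≤ q2.length)
    (hne : ¬(q1.drop i1 = [] ∧ q2.drop i2 = [])) :
    tqFront q1 i1 q2 i2 = aFront (q1.drop i1) (q2.drop i2) := by
  rw [← tqPop_fst, ← aPop_fst]
  exact (tqPop_corr q1 i1 q2 i2 h1 h2 hne).1

-- ---- stage 1: the port equals the abstract two-queue loop on the live suffixes ----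

theorem tqGo_eq_aGo (K : Int) (f : Nat) (q1 : List Int) (i1 : Nat) (q2 : List Int) (i2 : Nat)
    (ans : Int) (h1 : i1 ≤ q1.length) (h2 : i2 ≤ q2.length) :
    tqGo K f q1 i1 q2 i2 ans = aGo K f (q1.drop i1) (q2.drop i2) ans := by
  induction f generalizing q1 i1 q2 i2 ans with
  | zero => rfl
  | succ f ih =>
    by_cases hboth : q1.drop i1 = [] ∧ q2.drop i2 = []
    · have hg : ¬ (i1 < q1.length ∨ i2 < q2.length) := by
        rw [← drop_ne_nil_iff, ← drop_ne_nil_iff]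
        tauto
      simp only [tqGo, aGo, if_neg hg, hboth.1, hboth.2]
      rw [if_neg (by tauto)]
    · have hg : i1 < q1.length ∨ i2 < q2.length := by
        rw [← drop_ne_nil_iff, ← drop_ne_nil_iff]
        tauto
      have hlen1 : (q1.drop i1).length = q1.length - i1 := List.length_drop ..
      have hlen2 : (q2.drop i2).length = q2.length - i2 := List.length_drop ..
      have hfr := tqFront_corr q1 i1 q2 i2 h1 h2 hboth
      simp only [tqGo, aGo, if_pos hg, if_pos (show q1.drop i1 ≠ [] ∨ q2.drop i2 ≠ [] by tauto)]
      rw [hfr]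
      have hguard : (q1.length - i1) + (q2.length - i2)
          = (q1.drop i1).length + (q2.drop i2).length := by omega
      rw [hguard]
      by_cases hG : aFront (q1.drop i1) (q2.drop i2) < K ∧
          1 < (q1.drop i1).length + (q2.drop i2).length
      · rw [if_pos hG, if_pos hG]
        obtain ⟨p1v, p1a, p1b, p1c, p1d⟩ := tqPop_corr q1 i1 q2 i2 h1 h2 hboth
        rcases htq1 : tqPop q1 i1 q2 i2 with ⟨a, j1, j2⟩
        rcases hap1 : aPop (q1.drop i1) (q2.drop i2) with ⟨a', s1, s2⟩
        simp only [htq1, hap1] at p1v p1a p1b p1c p1d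
        have hs12ne : ¬(s1 = [] ∧ s2 = []) := by
          intro ⟨e1, e2⟩
          have := aPop_length (q1.drop i1) (q2.drop i2) hboth
          rw [hap1, e1, e2] at this
          simp at this
          omega
        have hboth2 : ¬(q1.drop j1 = [] ∧ q2.drop j2 = []) := by
          rw [p1c, p1d]; exact hs12ne
        obtain ⟨p2v, p2a, p2b, p2c, p2d⟩ := tqPop_corr q1 j1 q2 j2 p1a p1b hboth2
        rcases htq2 : tqPop q1 j1 q2 j2 with ⟨b, k1, k2⟩
        rcases hap2 : aPop s1 s2 with ⟨b', u1, u2⟩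
        simp only [htq2] at p2v p2a p2b p2c p2d
        simp only [p1c, p1d, hap2] at p2v p2c p2d
        rw [p1v, p2v]
        have hk2' : k2 ≤ (q2 ++ [a' + 2 * b']).length := by
          rw [List.length_append]
          simp
          omega
        rw [ih q1 k1 (q2 ++ [a' + 2 * b']) k2 (ans + 1) p2a hk2']
        rw [p2c, List.drop_append_of_le_length p2b, p2d]
      · rw [if_neg hG, if_neg hG]

-- ---- stage 2: A's heap loop equals the abstract two-queue loop ----

theorem solGo_eq_aGo (K : Int) (f : Nat) (h r1 r2 : List Int) (ans : Int)
    (hp : h.Perm (r1 ++ r2)) (hs1 : r1.Pairwise (· ≤ ·)) (hs2 : r2.Pairwise (· ≤ ·))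
    (hinv : Inv3 r2 (r1 ++ r2)) : solGo K f h ans = aGo K f r1 r2 ans := by
  induction f generalizing h r1 r2 ans with
  | zero => rfl
  | succ f ih =>
    by_cases hboth : r1 = [] ∧ r2 = []
    · obtain ⟨e1, e2⟩ := hboth
      subst e1; subst e2
      have : h = [] := by simpa using hp.eq_nil
      subst this; rfl
    · have hSne : r1 ++ r2 ≠ [] := by
        intro h0
        rcases List.append_eq_nil_iff.mp h0 with ⟨e1, e2⟩
        exact hboth ⟨e1, e2⟩
      have hne : h ≠ [] := by
        intro h0; subst h0; exact hSne hp.symm.eq_nil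
      obtain ⟨x, xs, rfl⟩ := List.exists_cons_of_ne_nil hne
      have hfrontS : aFront r1 r2 = pyMin (r1 ++ r2) := aFront_spec r1 r2 hs1 hs2 hboth
      have hminh : pyMin (x :: xs) = pyMin (r1 ++ r2) := pyMin_perm _ _ hp (by simp)
      have hlenh : (x :: xs).length = r1.length + r2.length := by
        rw [hp.length_eq, List.length_append]
      simp only [solGo, aGo, if_pos (show r1 ≠ [] ∨ r2 ≠ [] by tauto)]
      rw [hminh, hfrontS, hlenh]
      by_cases hG : pyMin (r1 ++ r2) < K ∧ 1 < r1.length + r2.length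
      · rw [if_pos hG, if_pos hG]
        have hSlen : 2 ≤ (r1 ++ r2).length := by
          rw [List.length_append]; omega
        -- first pop
        obtain ⟨hpe1, hsf1, hsf2⟩ := aPop_spec r1 r2 hs1 hs2 hboth
        rcases hap1 : aPop r1 r2 with ⟨a', s1, s2⟩
        have ha' : a' = pyMin (r1 ++ r2) := by
          have := aPop_fst r1 r2
          rw [hap1] at this
          simpa [hfrontS] using this
        rw [hap1] at hpe1 hsf1 hsf2
        simp only at hpe1 hsf1 hsf2
        have hS1 : s1 ++ s2 = (r1 ++ r2).erase (pyMin (r1 ++ r2)) := hpe1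
        have hS1len : (s1 ++ s2).length = (r1 ++ r2).length - 1 := by
          rw [hS1]
          exact List.length_erase_of_mem (pyMin_mem _ hSne)
        have hS1ne : (r1 ++ r2).erase (pyMin (r1 ++ r2)) ≠ [] := by
          rw [← hS1]
          intro h0
          rw [h0] at hS1len
          simp at hS1len
          omega
        have hs12ne : ¬(s1 = [] ∧ s2 = []) := by
          intro ⟨e1, e2⟩
          rw [e1, e2] at hS1
          exact hS1ne hS1.symm
        have hss1 : s1.Pairwise (· ≤ ·) := List.Pairwise.sublist hsf1.sublist hs1
        have hss2 : s2.Pairwise (· ≤ ·) := List.Pairwise.sublist hsf2.sublist hs2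
        -- second pop
        obtain ⟨hpe2, hsg1, hsg2⟩ := aPop_spec s1 s2 hss1 hss2 hs12ne
        rcases hap2 : aPop s1 s2 with ⟨b', u1, u2⟩
        rw [hap2] at hpe2 hsg1 hsg2
        simp only at hpe2 hsg1 hsg2
        have hb' : b' = pyMin ((r1 ++ r2).erase (pyMin (r1 ++ r2))) := by
          have hfst := aPop_fst s1 s2
          rw [hap2] at hfst
          simp only at hfst
          rw [hfst, aFront_spec s1 s2 hss1 hss2 hs12ne, hS1]
        have hT : u1 ++ u2 = ((r1 ++ r2).erase (pyMin (r1 ++ r2))).erase b' := by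
          rw [hpe2, hS1, ← hb']
        -- heap side values
        have hrest1 : ((x :: xs).erase (pyMin (r1 ++ r2))).Perm
            ((r1 ++ r2).erase (pyMin (r1 ++ r2))) := hp.erase _
        have hrest1ne : (x :: xs).erase (pyMin (r1 ++ r2)) ≠ [] := by
          intro h0
          rw [h0] at hrest1
          exact hS1ne hrest1.symm.eq_nil
        have hm2 : pyMin ((x :: xs).erase (pyMin (r1 ++ r2))) = b' := by
          rw [pyMin_perm _ _ hrest1 hrest1ne, hb']
        have hrest2 : (((x :: xs).erase (pyMin (r1 ++ r2))).erase b').Perm (u1 ++ u2) := by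
          rw [hT]
          exact hrest1.erase b'
        rw [hm2]
        -- facts used by the invariants
        have haS : pyMin (r1 ++ r2) ∈ r1 ++ r2 := pyMin_mem _ hSne
        have hbS1 : b' ∈ (r1 ++ r2).erase (pyMin (r1 ++ r2)) := hb' ▸ pyMin_mem _ hS1ne
        have hab : pyMin (r1 ++ r2) ≤ b' :=
          pyMin_le _ _ (List.mem_of_mem_erase hbS1)
        have hTlen : (u1 ++ u2).length = (r1 ++ r2).length - 2 := by
          rw [hpe2, List.length_erase_of_mem (pyMin_mem _ (by
            intro h0
            exact hs12ne (List.append_eq_nil_iff.mp h0))), hS1len]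
          omega
        have hyT : ∀ y ∈ u1 ++ u2, b' ≤ y := by
          intro y hy
          rw [hT] at hy
          exact hb' ▸ pyMin_le _ _ (List.mem_of_mem_erase hy)
        have hcle : ∀ c ∈ u1 ++ u2, c ∈ r2 → c ≤ pyMin (r1 ++ r2) + 2 * b' := by
          intro c hcT hcr2
          have hcS : c ∈ r1 ++ r2 := List.mem_append_right _ hcr2
          have hTne : u1 ++ u2 ≠ [] := List.ne_nil_of_mem hcT
          have hSlen3 : 3 ≤ (r1 ++ r2).length := by
            have : 1 ≤ (u1 ++ u2).length := List.length_pos_of_ne_nil hTne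
            omega
          have hclen : 2 ≤ ((r1 ++ r2).erase c).length := by
            rw [List.length_erase_of_mem hcS]
            omega
          have := hinv c hcr2 hclen
          rwa [m2sum_erase_eq (r1 ++ r2) (pyMin (r1 ++ r2)) b' c hSne rfl hS1ne hb'
            (hT ▸ hcT)] at this
        -- the new combined value
        set nw := pyMin (r1 ++ r2) + 2 * b' with hnw
        have hring : pyMin (r1 ++ r2) + b' * 2 = nw := by rw [hnw]; ring
        rw [hring]
        -- permutation for the recursive call
        have hnewperm : (nw :: (((x :: xs).erase (pyMin (r1 ++ r2))).erase b')).Perm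
            (u1 ++ (u2 ++ [nw])) := by
          refine (hrest2.cons nw).trans ?_
          refine ((List.perm_middle).symm.trans ?_ : (nw :: (u1 ++ u2)).Perm _)
          exact List.Perm.append_left u1 (List.perm_append_singleton nw u2).symm
        -- sortedness of the new combined queue
        have hu2r2 : u2 <:+ r2 := hsg2.trans hsf2
        have hsu1 : u1.Pairwise (· ≤ ·) := List.Pairwise.sublist hsg1.sublist hss1
        have hsu2 : u2.Pairwise (· ≤ ·) := List.Pairwise.sublist hsg2.sublist hss2
        have hsort2 : (u2 ++ [nw]).Pairwise (· ≤ ·) := by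
          rw [List.pairwise_append]
          refine ⟨hsu2, List.pairwise_singleton _ _, ?_⟩
          intro c hc d hd
          rw [List.mem_singleton] at hd
          subst hd
          exact hcle c (List.mem_append_right _ hc) (hu2r2.subset hc)
        -- the new pool, as a permutation of nw :: (u1 ++ u2)
        have hS'perm : (u1 ++ (u2 ++ [nw])).Perm (nw :: (u1 ++ u2)) := by
          refine ((List.Perm.append_left u1 (List.perm_append_singleton nw u2)).trans ?_)
          exact List.perm_middle
        -- the invariant for the new state
        have hinv' : Inv3 (u2 ++ [nw]) (u1 ++ (u2 ++ [nw])) := by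
          intro c hc hlen2
          have hcount : ((u1 ++ (u2 ++ [nw])).erase c).Perm ((nw :: (u1 ++ u2)).erase c) :=
            hS'perm.erase c
          rcases List.mem_append.mp hc with hcu2 | hcnw
          · -- a surviving combined value
            have hcT : c ∈ u1 ++ u2 := List.mem_append_right _ hcu2
            have hec : ((nw :: (u1 ++ u2)).erase c).Perm (nw :: (u1 ++ u2).erase c) :=
              erase_cons_perm nw c (u1 ++ u2) hcT
            have hperm2 : ((u1 ++ (u2 ++ [nw])).erase c).Perm (nw :: (u1 ++ u2).erase c) :=
              hcount.trans hec
            have hEne : (u1 ++ (u2 ++ [nw])).erase c ≠ [] := by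
              intro h0
              rw [h0] at hperm2
              have := hperm2.symm.eq_nil
              simp at this
            rw [m2sum_perm _ _ hperm2 hEne]
            have hMne : (u1 ++ u2).erase c ≠ [] := by
              have hl := hperm2.length_eq
              rw [List.length_cons] at hl
              have : 2 ≤ ((u1 ++ (u2 ++ [nw])).erase c).length := hlen2
              intro h0
              rw [h0] at hl
              simp at hl
              omega
            have hb0 : 0 ≤ b' := by
              have h1 : pyMin (r1 ++ r2) ≤ c :=
                pyMin_le _ _ (List.mem_append_right _ (hu2r2.subset hcu2))
              have h2 : c ≤ pyMin (r1 ++ r2) + 2 * b' :=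
                hcle c hcT (hu2r2.subset hcu2)
              omega
            refine min2_cons_bound nw b' c ((u1 ++ u2).erase c) ?_ hb0 hMne ?_ ?_
            · intro y hy
              exact hyT y (List.mem_of_mem_erase hy)
            · exact hcle c hcT (hu2r2.subset hcu2)
            · rw [hnw]; omega
          · -- c is the freshly pushed value
            rw [List.mem_singleton] at hcnw
            subst hcnw
            have hec : ((nw :: (u1 ++ u2)).erase nw) = u1 ++ u2 := List.erase_cons_head ..
            have hperm2 : ((u1 ++ (u2 ++ [nw])).erase nw).Perm (u1 ++ u2) := by
              rw [← hec]
              exact hS'perm.erase nw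
            have hEne : (u1 ++ (u2 ++ [nw])).erase nw ≠ [] := by
              intro h0
              have hl := hperm2.length_eq
              rw [h0] at hl
              simp only [List.length_nil] at hl
              have h2 : 2 ≤ ((u1 ++ (u2 ++ [nw])).erase nw).length := hlen2
              rw [h0] at h2
              simp at h2
            rw [m2sum_perm _ _ hperm2 hEne]
            have hTlen2 : 2 ≤ (u1 ++ u2).length := by
              have := hperm2.length_eq
              omega
            have hTne : u1 ++ u2 ≠ [] := by
              intro h0
              rw [h0] at hTlen2
              simp at hTlen2
            have hu : b' ≤ pyMin (u1 ++ u2) := hyT _ (pyMin_mem _ hTne)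
            have hTe_ne : (u1 ++ u2).erase (pyMin (u1 ++ u2)) ≠ [] := by
              intro h0
              have hl := List.length_erase_of_mem (pyMin_mem (u1 ++ u2) hTne)
              rw [h0] at hl
              simp only [List.length_nil] at hl
              omega
            have hv : b' ≤ pyMin ((u1 ++ u2).erase (pyMin (u1 ++ u2))) :=
              hyT _ (List.mem_of_mem_erase (pyMin_mem _ hTe_ne))
            unfold m2sum
            have hab' : pyMin (r1 ++ r2) ≤ b' := hab
            rw [hnw]
            omega
        rw [ha']
        exact ih _ _ _ _ hnewperm hsu1 hsort2 hinv'
      · rw [if_neg hG, if_neg hG]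

-- ===== VERDICT (by name: the statement is the Claim_ definition above) =====
theorem solution_spec : Claim_equal_solution := by
  intro scoville K _ hpre
  unfold Spec_solution solution solution_alt
  have hperm : scoville.Perm (PySem.List.sorted scoville (fun x => x) false) :=
    (PySem.List.sorted_perm (xs := scoville) (key := fun x => x) (rev := false)).symm
  have hsort : (PySem.List.sorted scoville (fun x => x) false).Pairwise (· ≤ ·) := by
    simpa using PySem.List.sorted_pairwise (xs := scoville) (key := fun x => x)
  have hlen : scoville.length = (PySem.List.sorted scoville (fun x => x) false).length :=
    hperm.length_eq
  rw [hlen, tqGo_eq_aGo K _ _ 0 _ 0 0 (by omega) (by simp)]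
  simp only [List.drop_zero, List.drop_nil]
  exact solGo_eq_aGo K _ _ _ [] 0 (by simpa using hperm) hsort (by simp)
    (by intro c hc; simp at hc)
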